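-- pv_equiv track=rewrite | github.com/2kindsofcs/exercise | python exercise/191202-tower-programmers.py | solution
-- ===== SOURCE A (Python) =====
-- def solution(heights):
--     length = len(heights)
--     answer = [ 0 for _ in range(length) ]
--     stack = []
--     index = length - 1
--     while index >= 0:
--         while stack:
--             if heights[stack[-1]] < heights[index]:
--                 prev = stack.pop()
--                 answer[prev] = index + 1
--             else:
--                 break
--         stack.append(index)
--         index = index - 1
--     return answer
-- ===== SOURCE B (Python) =====
-- def solution(heights):
--     answer = []
--     for i in range(len(heights)):
--         j = i - 1
--         while j >= 0 and heights[j] <= heights[i]: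
--             j -= 1
--         answer.append(j + 1)
--     return answer
-- ===== Notes on version B (the rewrite author's own statement) =====
-- stated objective: simpler
-- what changed: Replaces the right-to-left monotonic stack that assigns answers to elements as they are popped with a direct per-element backward scan that finds each tower's nearest strictly taller left neighbour, with no stack and no mutable answer array.
import Mathlib
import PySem

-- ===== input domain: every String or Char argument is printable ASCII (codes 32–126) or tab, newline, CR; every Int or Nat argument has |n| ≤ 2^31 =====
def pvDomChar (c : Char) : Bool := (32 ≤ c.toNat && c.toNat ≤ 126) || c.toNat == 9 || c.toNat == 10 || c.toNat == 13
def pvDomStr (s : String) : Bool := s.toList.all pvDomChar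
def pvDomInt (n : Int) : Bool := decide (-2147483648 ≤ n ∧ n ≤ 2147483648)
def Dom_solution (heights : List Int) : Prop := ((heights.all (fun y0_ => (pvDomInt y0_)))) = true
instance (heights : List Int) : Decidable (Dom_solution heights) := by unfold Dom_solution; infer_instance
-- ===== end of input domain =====

-- B replaces A's right-to-left monotonic stack (answers assigned on pop) with a direct
-- per-element backward scan for the nearest strictly taller left tower: simpler, no stack.

-- ===== PORT A =====
-- shared element access heights[i]; both Pythons only index at in-range nonnegative
-- indices, so the `.getD 0` default is never reached (exact on all admitted inputs)
def hAt (heights : List Int) (i : Int) : Int := (PySem.List.pyGet? heights i).getD 0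

-- inner `while stack: if heights[stack[-1]] < heights[index]: … pop … else: break`;
-- the list head plays the role of Python's stack[-1]
def popA (heights : List Int) (i : Int) : List Int → List Int → List Int × List Int
  | [], answer => ([], answer)
  | p :: rest, answer =>
    if hAt heights p < hAt heights i then
      popA heights i rest (answer.set p.toNat (i + 1))
    else (p :: rest, answer)

-- outer `while index >= 0` loop of A; fuel k means index = k - 1
def mainA (heights : List Int) : Nat → List Int → List Int → List Int
  | 0, _, answer => answer
  | k + 1, stack, answer =>
    let r := popA heights (k : Int) stack answer
    mainA heights k ((k : Int) :: r.1) r.2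

def solution (heights : List Int) : List Int :=
  mainA heights heights.length [] (List.replicate heights.length 0)

-- ===== PORT B =====
-- inner `while j >= 0 and heights[j] <= heights[i]: j -= 1` then `answer.append(j+1)`;
-- fuel t means j = t - 1
def fLB (heights : List Int) (h : Int) : Nat → Int
  | 0 => 0
  | t + 1 => if hAt heights (t : Int) ≤ h then fLB heights h t else (t : Int) + 1

def solution_alt (heights : List Int) : List Int :=
  (List.range heights.length).map (fun (i : Nat) => fLB heights (hAt heights (i : Int)) i)

-- ===== PRECONDITION & SPEC =====
def Spec_solution (heights : List Int) (out : List Int) : Prop := out = solution_alt heights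
instance (heights : List Int) (out : List Int) : Decidable (Spec_solution heights out) := by unfold Spec_solution; infer_instance

-- ===== CLAIM (what is proved, stated in full; the proofs are below) =====
def Claim_equal_solution : Prop := ∀ (heights : List Int), Dom_solution heights → Spec_solution heights (solution heights)

-- ===== LEMMAS AND PROOFS =====

-- abbreviations used only by the proofs
def Fv (heights : List Int) (j : Nat) : Int := fLB heights (hAt heights (j : Int)) j

-- stack contents of A just before index k-1 is processed: the already-visited indices
-- whose nearest taller left tower (if any) has not been visited yet, in increasing order
def Sk (heights : List Int) (k : Nat) : List Int :=
  ((List.range' k (heights.length - k)).filter (fun j => decide (Fv heights j ≤ (k : Int)))).map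
    (fun j => ((j : Nat) : Int))

lemma fLB_nonneg (heights : List Int) (h : Int) : ∀ (m : Nat), 0 ≤ fLB heights h m := by
  intro m; induction m with
  | zero => simp [fLB]
  | succ t ih => simp only [fLB]; split <;> omega

lemma fLB_le (heights : List Int) (h : Int) : ∀ (m : Nat), fLB heights h m ≤ (m : Int) := by
  intro m; induction m with
  | zero => simp [fLB]
  | succ t ih => simp only [fLB]; split <;> [omega; omega]

lemma fLB_gt (heights : List Int) (h : Int) :
    ∀ (m t : Nat), t < m → h < hAt heights (t : Int) → (t : Int) < fLB heights h m := by
  intro m; induction m with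
  | zero => omega
  | succ s ih =>
    intro t ht hh
    simp only [fLB]; split
    · rename_i hle
      rcases Nat.lt_succ_iff_lt_or_eq.mp ht with h' | h'
      · exact ih t h' hh
      · subst h'; omega
    · omega

lemma fLB_peel (heights : List Int) (h : Int) :
    ∀ (m c : Nat), c ≤ m → (∀ (t : Nat), c ≤ t → t < m → hAt heights (t : Int) ≤ h) →
      fLB heights h m = fLB heights h c := by
  intro m; induction m with
  | zero =>
    intro c hc _
    have : c = 0 := by omega
    subst this; rfl
  | succ s ih =>
    intro c hc hall
    rcases Nat.lt_succ_iff_lt_or_eq.mp (Nat.lt_succ_of_le hc) with h' | h'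
    · have hs : hAt heights (s : Int) ≤ h := hall s (by omega) (by omega)
      simp only [fLB, if_pos hs]
      exact ih c (by omega) (fun t h1 h2 => hall t h1 (by omega))
    · subst h'; rfl

-- the two loop components of popA, by structural induction
lemma popA_eq (heights : List Int) (i : Int) :
    ∀ (s a : List Int),
      popA heights i s a =
        (s.dropWhile (fun x => decide (hAt heights x < hAt heights i)),
         (s.takeWhile (fun x => decide (hAt heights x < hAt heights i))).foldl
           (fun acc p => acc.set p.toNat (i + 1)) a) := by
  intro s
  induction s with
  | nil => intro a; rfl
  | cons p rest ih =>
    intro a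
    by_cases hp : hAt heights p < hAt heights i
    · simp [popA, hp, List.dropWhile, List.takeWhile, ih]
    · simp [popA, hp, List.dropWhile, List.takeWhile]

lemma dw_tw {α : Type} (p : α → Bool) :
    ∀ l : List α, l.Pairwise (fun x y => p x = false → p y = false) →
      l.dropWhile p = l.filter (fun x => !p x) ∧ l.takeWhile p = l.filter p := by
  intro l
  induction l with
  | nil => intro _; exact ⟨rfl, rfl⟩
  | cons a l ih =>
    intro hpw
    rcases List.pairwise_cons.mp hpw with ⟨ha, hl⟩
    by_cases hpa : p a = true
    · have := ih hl
      simp [List.dropWhile, List.takeWhile, List.filter, hpa, this.1, this.2]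
    · have hpa' : p a = false := by simpa using hpa
      have hall : ∀ x ∈ l, p x = false := fun x hx => ha x hx hpa'
      constructor
      · have h1 : List.filter (fun x => !p x) l = l :=
          List.filter_eq_self.mpr (fun x hx => by simp [hall x hx])
        simp [List.dropWhile, List.filter, hpa', h1]
      · have h2 : List.filter p l = [] :=
          List.filter_eq_nil_iff.mpr (fun x hx => by simp [hall x hx])
        simp [List.takeWhile, List.filter, hpa', h2]

lemma foldl_set (v : Int) :
    ∀ (P a : List Int), (∀ p ∈ P, 0 ≤ p ∧ p.toNat < a.length) →
      (P.foldl (fun acc p => acc.set p.toNat v) a).length = a.length ∧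
      (∀ j : Nat, j < a.length →
        (P.foldl (fun acc p => acc.set p.toNat v) a).getD j 0 =
          if ((j : Nat) : Int) ∈ P then v else a.getD j 0) := by
  intro P
  induction P with
  | nil => intro a _; simp
  | cons p P ih =>
    intro a hmem
    have hp := hmem p (by simp)
    have hrec := ih (a.set p.toNat v) (by
      intro q hq
      have := hmem q (by simp [hq])
      simpa using this)
    constructor
    · simpa using hrec.1
    · intro j hj
      have hj' : j < (a.set p.toNat v).length := by simpa using hj
      rw [List.foldl_cons, hrec.2 j hj']
      by_cases hjp : ((j : Nat) : Int) = p
      · have hpj : p.toNat = j := by omega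
        simp [hjp, hpj, List.getD_eq_getElem?_getD, hj]
      · have hpj : p.toNat ≠ j := by omega
        by_cases hjP : ((j : Nat) : Int) ∈ P
        · simp [hjP, hjp]
        · simp [hjP, hjp, List.getD_eq_getElem?_getD, hpj]

-- monotone heights along still-stacked indices
lemma hh_le_of_F (heights : List Int) {m t j : Nat} (hF : Fv heights j ≤ (m : Int))
    (h1 : m ≤ t) (h2 : t < j) : hAt heights (t : Int) ≤ hAt heights (j : Int) := by
  by_contra hc
  have := fLB_gt heights (hAt heights (j : Int)) j t h2 (by omega)
  unfold Fv at hF; omega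

-- what B computes on an index still on the stack at step k, after tower k is compared
lemma char (heights : List Int) {k j : Nat} (hj : k < j)
    (hF : Fv heights j ≤ (k : Int) + 1) :
    (hAt heights (j : Int) < hAt heights (k : Int) → Fv heights j = (k : Int) + 1) ∧
    (hAt heights (k : Int) ≤ hAt heights (j : Int) → Fv heights j ≤ (k : Int)) := by
  have hall : ∀ t, k + 1 ≤ t → t < j → hAt heights (t : Int) ≤ hAt heights (j : Int) := by
    intro t h1 h2
    exact hh_le_of_F heights (by push_cast; omega) h1 h2
  have hpeel : Fv heights j = fLB heights (hAt heights (j : Int)) (k + 1) := by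
    unfold Fv; exact fLB_peel heights _ j (k + 1) (by omega) hall
  constructor
  · intro hlt
    rw [hpeel]; simp only [fLB]
    rw [if_neg (by omega)]
  · intro hle
    rw [hpeel]; simp only [fLB]
    rw [if_pos hle]
    exact le_trans (fLB_le heights _ k) (by omega)

lemma mem_Sk (heights : List Int) (k : Nat) (hk : k ≤ heights.length) (x : Int) :
    x ∈ Sk heights k ↔ ∃ j : Nat, x = (j : Int) ∧ k ≤ j ∧ j < heights.length ∧
      Fv heights j ≤ (k : Int) := by
  unfold Sk
  simp only [List.mem_map, List.mem_filter, List.mem_range'_1, decide_eq_true_eq]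
  constructor
  · rintro ⟨j, ⟨⟨h1, h2⟩, h3⟩, rfl⟩
    exact ⟨j, rfl, h1, by omega, h3⟩
  · rintro ⟨j, rfl, h1, h2, h3⟩
    exact ⟨j, ⟨⟨h1, by omega⟩, h3⟩, rfl⟩

lemma mainA_spec (heights : List Int) :
    ∀ (k : Nat), k ≤ heights.length → ∀ a : List Int, a.length = heights.length →
      (∀ j : Nat, j < heights.length →
        a.getD j 0 = if (k : Int) < Fv heights j then Fv heights j else 0) →
      mainA heights k (Sk heights k) a = solution_alt heights := by
  intro k
  induction k with
  | zero =>
    intro _ a hlen hinv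
    have hFz : ∀ j : Nat, j < heights.length → a.getD j 0 = Fv heights j := by
      intro j hj
      rw [hinv j hj]
      have h0 := fLB_nonneg heights (hAt heights (j : Int)) j
      unfold Fv
      split <;> omega
    simp only [mainA]
    apply List.ext_getElem
    · simp [solution_alt, hlen]
    · intro j h1 h2
      have hj : j < heights.length := by simpa [hlen] using h1
      have hL : a[j] = Fv heights j := by
        have := hFz j hj
        rwa [List.getD_eq_getElem?_getD, List.getElem?_eq_getElem h1,
          Option.getD_some] at this
      rw [hL]
      simp [solution_alt, Fv]
  | succ k ih =>
    intro hk1 a hlen hinv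
    have hk : k < heights.length := hk1
    have hmem : ∀ x ∈ Sk heights (k+1), ∃ j : Nat, x = (j : Int) ∧ k + 1 ≤ j ∧
        j < heights.length ∧ Fv heights j ≤ (k : Int) + 1 := by
      intro x hx
      rcases (mem_Sk heights (k+1) (by omega) x).mp hx with ⟨j, rfl, h1, h2, h3⟩
      exact ⟨j, rfl, h1, h2, by push_cast at h3; omega⟩
    have hpw : (Sk heights (k+1)).Pairwise
        (fun x y => (decide (hAt heights x < hAt heights (k : Int)) = false →
          decide (hAt heights y < hAt heights (k : Int)) = false)) := by
      unfold Sk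
      rw [List.pairwise_map]
      have h0 : (List.range' (k+1) (heights.length - (k+1))).Pairwise (· < ·) :=
        List.pairwise_lt_range' 1 Nat.one_pos
      have h1 := h0.filter (fun j => decide (Fv heights j ≤ ((k+1 : Nat) : Int)))
      refine h1.imp_of_mem ?_
      intro a' b' ha' hb' hab hpa
      have hb'' := List.mem_filter.mp hb'
      have ha'' := List.mem_filter.mp ha'
      have hbr := List.mem_range'_1.mp hb''.1
      have har := List.mem_range'_1.mp ha''.1
      have hFb : Fv heights b' ≤ (k : Int) + 1 := by
        have := of_decide_eq_true hb''.2; push_cast at this; omega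
      have hle : hAt heights (a' : Int) ≤ hAt heights (b' : Int) :=
        hh_le_of_F heights (j := b') (m := k + 1) (by push_cast; omega) (by omega) hab
      simp only [decide_eq_false_iff_not, not_lt] at hpa ⊢
      omega
    obtain ⟨hdw, htw⟩ :=
      dw_tw (fun x => decide (hAt heights x < hAt heights (k : Int))) (Sk heights (k+1)) hpw
    have hPmem : ∀ j : Nat,
        ((j : Int) ∈ (Sk heights (k+1)).filter
          (fun x => decide (hAt heights x < hAt heights (k : Int)))) ↔
        (k + 1 ≤ j ∧ j < heights.length ∧ Fv heights j = (k : Int) + 1) := by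
      intro j
      rw [List.mem_filter]
      constructor
      · rintro ⟨hx, hpx⟩
        rcases hmem _ hx with ⟨j', hj', h1, h2, h3⟩
        have hjj : j = j' := by omega
        subst hjj
        refine ⟨h1, h2, (char heights (by omega) h3).1 ?_⟩
        exact of_decide_eq_true hpx
      · rintro ⟨h1, h2, h3⟩
        have hFle : Fv heights j ≤ (k : Int) + 1 := by omega
        refine ⟨(mem_Sk heights (k+1) (by omega) _).mpr
          ⟨j, rfl, h1, h2, by push_cast; omega⟩, ?_⟩
        rw [decide_eq_true_iff]
        by_contra hc
        have := (char heights (show k < j by omega) hFle).2 (by omega)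
        omega
    have hstack : (k : Int) :: (Sk heights (k+1)).filter
        (fun x => !decide (hAt heights x < hAt heights (k : Int))) = Sk heights k := by
      unfold Sk
      have hr : List.range' k (heights.length - k) =
          k :: List.range' (k+1) (heights.length - (k+1)) := by
        have h : heights.length - k = (heights.length - (k+1)) + 1 := by omega
        rw [h, List.range'_succ]
      rw [hr, List.filter_cons, if_pos (by
        rw [decide_eq_true_iff]; exact fLB_le heights _ k), List.map_cons]
      congr 1
      rw [List.filter_map]
      congr 1
      rw [List.filter_filter]
      apply List.filter_congr
      intro j hj
      have hjr := List.mem_range'_1.mp hj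
      rw [Bool.eq_iff_iff]
      simp only [Function.comp_apply, Bool.and_eq_true, Bool.not_eq_true',
        decide_eq_false_iff_not, decide_eq_true_iff, not_lt]
      constructor
      · rintro ⟨hge, hFle⟩
        have hFle' : Fv heights j ≤ (k : Int) + 1 := by push_cast at hFle; omega
        have := (char heights (show k < j by omega) hFle').2 hge
        omega
      · intro hFk
        have hFle' : Fv heights j ≤ (k : Int) + 1 := by omega
        constructor
        · by_contra hc
          have := (char heights (show k < j by omega) hFle').1 (by omega)
          omega
        · push_cast; omega
    simp only [mainA, popA_eq, hdw, htw, hstack]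
    have hPbound : ∀ x ∈ (Sk heights (k+1)).filter
        (fun x => decide (hAt heights x < hAt heights (k : Int))),
        0 ≤ x ∧ x.toNat < a.length := by
      intro x hx
      rcases hmem _ (List.mem_filter.mp hx).1 with ⟨j, rfl, h1, h2, _⟩
      constructor
      · positivity
      · omega
    obtain ⟨halen, hag⟩ := foldl_set ((k : Int) + 1)
      ((Sk heights (k+1)).filter (fun x => decide (hAt heights x < hAt heights (k : Int))))
      a hPbound
    apply ih (by omega)
    · rw [halen, hlen]
    · intro j hj
      rw [hag j (by omega)]
      by_cases hjP : ((j : Nat) : Int) ∈ (Sk heights (k+1)).filter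
          (fun x => decide (hAt heights x < hAt heights (k : Int)))
      · have := (hPmem j).mp hjP
        rw [if_pos hjP, if_pos (by omega)]
        omega
      · rw [if_neg hjP, hinv j hj]
        have hnot := (fun h => hjP ((hPmem j).mpr h))
        have hFj : Fv heights j ≠ (k : Int) + 1 ∨ ¬ (k + 1 ≤ j) := by
          by_cases h1 : k + 1 ≤ j
          · left; intro hc; exact hnot ⟨h1, hj, hc⟩
          · right; exact h1
        have hFle := fLB_le heights (hAt heights (j : Int)) j
        by_cases hcase : Fv heights j = (k : Int) + 1
        · -- then k + 1 ≤ j must fail, but Fv j ≤ j forces k + 1 ≤ j: contradiction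
          exfalso
          rcases hFj with h | h
          · exact h hcase
          · have h2 : Fv heights j ≤ (j : Int) := hFle
            omega
        · split <;> split <;> omega

-- ===== VERDICT (by name: the statement is the Claim_ definition above) =====
theorem solution_spec : Claim_equal_solution := by
  intro heights _
  unfold Spec_solution solution
  have h0 : Sk heights heights.length = [] := by
    unfold Sk; simp
  rw [← h0]
  apply mainA_spec heights heights.length le_rfl
  · simp
  · intro j hj
    have hFle := fLB_le heights (hAt heights (j : Int)) j
    rw [if_neg (by unfold Fv; omega)]
    simp [List.getD_eq_getElem?_getD, hj]
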